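-- pv_equiv track=rewrite | github.com/petno1/project_euler | p23.py | sum_of_positive_integers
-- ===== SOURCE A (Python) =====
-- from math import sqrt
--
-- def find_abundant(limit):
--     abundant_numbers = []
--     for i in range(1, limit+1):
--         factors = [x for x in range(1, int(sqrt(i))+1) if i%x == 0]
--         factors = sum(factors + [i//x for x in factors if x*x!=i]) - i
--         if factors > i:
--             abundant_numbers.append(i)
--     return abundant_numbers
--
-- def sum_of_positive_integers(limit):
--     abundant_nums = find_abundant(limit)
--     bitset = [False]*(limit+1)
--     for i in range(len(abundant_nums)):
--         for j in range(i, len(abundant_nums)):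
--             abundant_sum = abundant_nums[i] + abundant_nums[j]
--             if abundant_sum <= limit:
--                 bitset[abundant_sum] = True
--     return sum(i for i, is_abundant in enumerate(bitset) if not is_abundant)
-- ===== SOURCE B (Python) =====
-- from math import sqrt
--
-- def find_abundant(limit):
--     abundant_numbers = []
--     for i in range(1, limit+1):
--         factors = [x for x in range(1, int(sqrt(i))+1) if i%x == 0]
--         factors = sum(factors + [i//x for x in factors if x*x!=i]) - i
--         if factors > i:
--             abundant_numbers.append(i)
--     return abundant_numbers
--
-- def sum_of_positive_integers(limit):
--     abundant = find_abundant(limit)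
--     is_abundant = [False] * (limit + 1)
--     for a in abundant:
--         is_abundant[a] = True
--     total = 0
--     for n in range(limit + 1):
--         expressible = False
--         for a in abundant:
--             if a > n:
--                 break
--             if is_abundant[n - a]:
--                 expressible = True
--                 break
--         if not expressible:
--             total += n
--     return total
-- ===== Notes on version B (the rewrite author's own statement) =====
-- stated objective: alternative
-- what changed: Instead of marking a bitset with every pairwise sum of abundant numbers and summing the unmarked indices, B iterates over each integer n up to limit and scans the sorted abundant list (breaking once a > n) for an abundant complement n-a in a set, summing the n for which none exists.
import Mathlib
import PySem

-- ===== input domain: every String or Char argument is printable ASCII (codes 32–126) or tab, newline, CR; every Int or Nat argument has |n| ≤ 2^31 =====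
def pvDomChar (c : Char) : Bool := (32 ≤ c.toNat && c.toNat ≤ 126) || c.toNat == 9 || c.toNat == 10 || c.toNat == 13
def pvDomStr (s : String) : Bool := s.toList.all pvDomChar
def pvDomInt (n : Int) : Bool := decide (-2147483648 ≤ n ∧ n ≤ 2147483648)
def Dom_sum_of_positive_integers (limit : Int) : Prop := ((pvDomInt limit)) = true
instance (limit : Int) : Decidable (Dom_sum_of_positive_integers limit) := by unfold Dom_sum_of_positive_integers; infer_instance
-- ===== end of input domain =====

-- B replaces A's pair-marking of a bitset by a per-number scan for an abundant
-- complement in a set (alternative decomposition; not faster).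

-- ===== PORT A =====
-- int(sqrt(i)) is ported as Nat.sqrt: exact here because for 0 ≤ i ≤ 2^31 the double
-- sqrt is correctly rounded (well below 2^52), so int(sqrt(i)) = ⌊√i⌋.
def find_abundant (limit : Int) : List Int :=
  (PySem.List.pyRange 1 (limit + 1) 1).foldl (fun abundant_numbers i =>
    let factors : List Int :=
      (PySem.List.pyRange 1 ((Nat.sqrt i.toNat : Int) + 1) 1).filter
        (fun x => PySem.Int.mod i x == 0)
    let s : Int :=
      (factors ++ (factors.filter (fun x => x * x != i)).map
        (fun x => PySem.Int.floordiv i x)).sum - i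
    if s > i then abundant_numbers ++ [i] else abundant_numbers) []

-- the loop indices i, j are Nat (range(len(…))), so abundant_nums[i] is Array.getD (always
-- in range, hence exact; the Python list/bitset are backed by Array for evaluation speed); abundant_sum is a sum of two positive list elements, so .toNat
-- at the bitset write is exact and the write is always in bounds.
def sum_of_positive_integers (limit : Int) : Int :=
  let abundant_nums := (find_abundant limit).toArray
  let bitset : Array Bool :=
    (List.range abundant_nums.size).foldl (fun bs i =>
      (List.range' i (abundant_nums.size - i)).foldl (fun bs j =>
        let abundant_sum := abundant_nums.getD i 0 + abundant_nums.getD j 0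
        if abundant_sum ≤ limit then bs.setIfInBounds abundant_sum.toNat true else bs) bs)
      (Array.replicate (limit + 1).toNat false)
  (PySem.List.enumerate bitset.toList 0).foldl
    (fun acc p => if !p.2 then acc + p.1 else acc) 0

-- ===== PORT B =====
-- the inner 'for a in abundant: if a > n: break; if is_abundant[n - a]: …' loop;
-- n - a is ≥ 0 at the membership test (a ≤ n there), so .toNat is exact and in bounds.
def scanLoop (is_abundant : Array Bool) (n : Int) : List Int → Bool
  | [] => false
  | a :: rest =>
    if a > n then false
    else if is_abundant.getD (n - a).toNat false then true
    else scanLoop is_abundant n rest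

-- the Python boolean list is_abundant is backed by Array for evaluation speed; the
-- writes is_abundant[a] = True are always in bounds (1 ≤ a ≤ limit).
def sum_of_positive_integers_alt (limit : Int) : Int :=
  let abundant := find_abundant limit
  let is_abundant : Array Bool :=
    abundant.foldl (fun fl a => fl.setIfInBounds a.toNat true)
      (Array.replicate (limit + 1).toNat false)
  (PySem.List.pyRange 0 (limit + 1) 1).foldl
    (fun total n => if scanLoop is_abundant n abundant then total else total + n) 0

-- ===== PRECONDITION & SPEC =====
def Spec_sum_of_positive_integers (limit : Int) (out : Int) : Prop := out = sum_of_positive_integers_alt limit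
instance (limit : Int) (out : Int) : Decidable (Spec_sum_of_positive_integers limit out) := by unfold Spec_sum_of_positive_integers; infer_instance

-- ===== CLAIM (what is proved, stated in full; the proofs are below) =====
def Claim_equal_sum_of_positive_integers : Prop := ∀ (limit : Int), Dom_sum_of_positive_integers limit → Spec_sum_of_positive_integers limit (sum_of_positive_integers limit)

-- ===== LEMMAS AND PROOFS =====

-- the body of A's marking loop
def pvStep (limit : Int) (bs : List Bool) (s : Int) : List Bool :=
  if s ≤ limit then bs.set s.toNat true else bs

-- the list of all pair sums A's double loop runs through
def pvSums (ab : List Int) : List Int :=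
  (List.range ab.length).flatMap (fun i =>
    (List.range' i (ab.length - i)).map (fun j => ab.getD i 0 + ab.getD j 0))

-- A's bitset, as a single fold over the pair sums
def pvBitset (limit : Int) : List Bool :=
  (pvSums (find_abundant limit)).foldl (pvStep limit)
    (List.replicate (limit + 1).toNat false)

lemma pv_foldl_flatMap {σ β γ : Type} (step : σ → γ → σ) (g : β → List γ)
    (l : List β) (bs : σ) :
    l.foldl (fun bs i => (g i).foldl step bs) bs = (l.flatMap g).foldl step bs := by
  induction l generalizing bs with
  | nil => rfl
  | cons x xs ih => simp [List.foldl_append, ih]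

lemma pv_mark_length (limit : Int) (ps : List Int) (bs : List Bool) :
    (ps.foldl (pvStep limit) bs).length = bs.length := by
  induction ps generalizing bs with
  | nil => rfl
  | cons s ps ih => rw [List.foldl_cons, ih]; unfold pvStep; split <;> simp

lemma pv_mark_getD (limit : Int) (ps : List Int) (bs : List Bool) (k : Nat)
    (hk : k < bs.length) (hpos : ∀ s ∈ ps, 0 ≤ s) :
    ((ps.foldl (pvStep limit) bs).getD k false = true ↔
      (bs.getD k false = true ∨ ∃ s ∈ ps, s ≤ limit ∧ s = (k : Int))) := by
  induction ps generalizing bs with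
  | nil => simp
  | cons s ps ih =>
    have hs : 0 ≤ s := hpos s (by simp)
    have hlen : (pvStep limit bs s).length = bs.length := by
      unfold pvStep; split <;> simp
    rw [List.foldl_cons, ih (pvStep limit bs s) (by omega)
      (fun t ht => hpos t (by simp [ht]))]
    have hgd : ((pvStep limit bs s).getD k false = true ↔
        (bs.getD k false = true ∨ (s ≤ limit ∧ s = (k : Int)))) := by
      unfold pvStep
      split
      · rename_i hle
        by_cases hsk : s = (k : Int)
        · have hk' : s.toNat = k := by omega
          rw [hk']
          rw [List.getD_eq_getElem _ _ (by simpa using hk)]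
          simp
          exact Or.inr ⟨hle, hsk⟩
        · have hne : s.toNat ≠ k := by omega
          rw [show (bs.set s.toNat true).getD k false = bs.getD k false by
            simp [List.getD, List.getElem?_set_ne hne]]
          constructor
          · exact Or.inl
          · rintro (h | ⟨_, h2⟩)
            · exact h
            · exact absurd h2 hsk
      · rename_i hle
        constructor
        · exact Or.inl
        · rintro (h | ⟨h1, _⟩)
          · exact h
          · exact absurd h1 hle
    rw [hgd]
    constructor
    · rintro (h | h)
      · rcases h with h | h
        · exact Or.inl h
        · exact Or.inr ⟨s, by simp, h⟩
      · rcases h with ⟨t, ht, h⟩; exact Or.inr ⟨t, by simp [ht], h⟩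
    · rintro (h | ⟨t, ht, h⟩)
      · exact Or.inl (Or.inl h)
      · rcases List.mem_cons.mp ht with rfl | ht
        · exact Or.inl (Or.inr h)
        · exact Or.inr ⟨t, ht, h⟩

lemma pv_arr_mark_toList (limit : Int) (ps : List Int) (a : Array Bool) :
    (ps.foldl (fun bs s => if s ≤ limit then bs.setIfInBounds s.toNat true else bs) a).toList
      = ps.foldl (pvStep limit) a.toList := by
  induction ps generalizing a with
  | nil => rfl
  | cons s ps ih =>
    rw [List.foldl_cons, List.foldl_cons, ih]
    congr 1
    unfold pvStep
    split
    · simp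
    · rfl

lemma pv_toArray_getD (l : List Int) (i : Nat) : l.toArray.getD i 0 = l.getD i 0 := by
  by_cases h : i < l.length
  · rw [Array.getD, dif_pos (by simpa using h), List.getD_eq_getElem _ _ h]
    simp
  · rw [Array.getD, dif_neg (by simpa using h)]
    simp [List.getD, List.getElem?_eq_none (by omega : l.length ≤ i)]

-- B's is_abundant array
def pvFlags (limit : Int) : Array Bool :=
  (find_abundant limit).foldl (fun fl a => fl.setIfInBounds a.toNat true)
    (Array.replicate (limit + 1).toNat false)

lemma pv_array_getD_toList (arr : Array Bool) (m : Nat) :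
    arr.getD m false = arr.toList.getD m false := by
  by_cases h : m < arr.size
  · rw [Array.getD, dif_pos h, List.getD_eq_getElem _ _ (by simpa using h)]
    simp
  · rw [Array.getD, dif_neg h]
    have hlen : arr.toList.length ≤ m := by simpa using Nat.le_of_not_lt h
    simp [List.getD, List.getElem?_eq_none hlen]

lemma pv_flag_mark_toList (l : List Int) (a : Array Bool) :
    (l.foldl (fun fl x => fl.setIfInBounds x.toNat true) a).toList
      = l.foldl (fun fl x => fl.set x.toNat true) a.toList := by
  induction l generalizing a with
  | nil => rfl
  | cons x l ih =>
    rw [List.foldl_cons, List.foldl_cons, ih]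
    congr 1
    simp

lemma pv_flag_getD (l : List Int) (bs : List Bool) (k : Nat) (hk : k < bs.length)
    (hpos : ∀ x ∈ l, 0 ≤ x) :
    ((l.foldl (fun fl x => fl.set x.toNat true) bs).getD k false = true ↔
      (bs.getD k false = true ∨ (k : Int) ∈ l)) := by
  induction l generalizing bs with
  | nil => simp
  | cons x l ih =>
    have hx : 0 ≤ x := hpos x (by simp)
    rw [List.foldl_cons, ih (bs.set x.toNat true) (by simpa using hk)
      (fun t ht => hpos t (by simp [ht]))]
    have hgd : ((bs.set x.toNat true).getD k false = true ↔
        (bs.getD k false = true ∨ x = (k : Int))) := by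
      by_cases hxk : x = (k : Int)
      · have hk' : x.toNat = k := by omega
        rw [hk', List.getD_eq_getElem _ _ (by simpa using hk)]
        simp [hxk]
      · have hne : x.toNat ≠ k := by omega
        rw [show (bs.set x.toNat true).getD k false = bs.getD k false by
          simp [List.getD, List.getElem?_set_ne hne]]
        constructor
        · exact Or.inl
        · rintro (h | h)
          · exact h
          · exact absurd h hxk
    rw [hgd]
    constructor
    · rintro ((h | h) | h)
      · exact Or.inl h
      · exact Or.inr (List.mem_cons.mpr (Or.inl h.symm))
      · exact Or.inr (List.mem_cons.mpr (Or.inr h))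
    · rintro (h | h)
      · exact Or.inl (Or.inl h)
      · rcases List.mem_cons.mp h with h | h
        · exact Or.inl (Or.inr h.symm)
        · exact Or.inr h

lemma pv_foldl_append_sublist (f : List Int → Int → List Int)
    (hf : ∀ acc x, f acc x = acc ++ [x] ∨ f acc x = acc) (l acc : List Int) :
    ∃ t, l.foldl f acc = acc ++ t ∧ t.Sublist l := by
  induction l generalizing acc with
  | nil => exact ⟨[], by simp⟩
  | cons x xs ih =>
    rcases hf acc x with h | h
    · rcases ih (acc ++ [x]) with ⟨t, ht, hsub⟩
      exact ⟨x :: t, by simp [h, ht], List.Sublist.cons₂ x hsub⟩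
    · rcases ih acc with ⟨t, ht, hsub⟩
      exact ⟨t, by simp [h, ht], List.Sublist.cons x hsub⟩

lemma pv_fa_sublist (limit : Int) :
    (find_abundant limit).Sublist (PySem.List.pyRange 1 (limit + 1) 1) := by
  have h : find_abundant limit =
      (PySem.List.pyRange 1 (limit + 1) 1).foldl (fun abundant_numbers i =>
        if ((PySem.List.pyRange 1 ((Nat.sqrt i.toNat : Int) + 1) 1).filter
              (fun x => PySem.Int.mod i x == 0) ++
            (((PySem.List.pyRange 1 ((Nat.sqrt i.toNat : Int) + 1) 1).filter
              (fun x => PySem.Int.mod i x == 0)).filter (fun x => x * x != i)).map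
              (fun x => PySem.Int.floordiv i x)).sum - i > i
        then abundant_numbers ++ [i] else abundant_numbers) [] := rfl
  rcases pv_foldl_append_sublist (fun abundant_numbers i =>
        if ((PySem.List.pyRange 1 ((Nat.sqrt i.toNat : Int) + 1) 1).filter
              (fun x => PySem.Int.mod i x == 0) ++
            (((PySem.List.pyRange 1 ((Nat.sqrt i.toNat : Int) + 1) 1).filter
              (fun x => PySem.Int.mod i x == 0)).filter (fun x => x * x != i)).map
              (fun x => PySem.Int.floordiv i x)).sum - i > i
        then abundant_numbers ++ [i] else abundant_numbers)
    (fun acc x => by beta_reduce; split <;> [exact Or.inl rfl; exact Or.inr rfl])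
    (PySem.List.pyRange 1 (limit + 1) 1) [] with ⟨t, ht, hsub⟩
  rw [h, ht]; simpa using hsub

lemma pv_fa_sorted (limit : Int) : (find_abundant limit).Pairwise (· < ·) :=
  (PySem.List.pairwise_lt_pyRange_one 1 (limit + 1)).sublist (pv_fa_sublist limit)

lemma pv_fa_mem {limit x : Int} (hx : x ∈ find_abundant limit) : 1 ≤ x ∧ x < limit + 1 :=
  PySem.List.mem_pyRange_one.mp ((pv_fa_sublist limit).mem hx)

lemma pv_flag_iff (limit : Int) (m : Nat) (hm : m < (limit + 1).toNat) :
    ((pvFlags limit).getD m false = true ↔ (m : Int) ∈ find_abundant limit) := by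
  unfold pvFlags
  rw [pv_array_getD_toList, pv_flag_mark_toList, Array.toList_replicate]
  rw [pv_flag_getD _ _ m (by simpa using hm)
    (fun x hx => by have := (pv_fa_mem hx).1; omega)]
  rw [show (List.replicate (limit + 1).toNat false).getD m false = false by
    simp [List.getD]]
  simp

lemma pv_sums_mem (ab : List Int) (s : Int) :
    s ∈ pvSums ab ↔ ∃ a ∈ ab, ∃ b ∈ ab, s = a + b := by
  unfold pvSums
  simp only [List.mem_flatMap, List.mem_range, List.mem_map, List.mem_range'_1]
  constructor
  · rintro ⟨i, hi, j, ⟨hij, hj⟩, rfl⟩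
    have hj' : j < ab.length := by omega
    rw [List.getD_eq_getElem _ _ hi, List.getD_eq_getElem _ _ hj']
    exact ⟨ab[i], List.getElem_mem hi, ab[j], List.getElem_mem hj', rfl⟩
  · rintro ⟨a, ha, b, hb, rfl⟩
    rcases List.mem_iff_getElem.mp ha with ⟨i, hi, rfl⟩
    rcases List.mem_iff_getElem.mp hb with ⟨j, hj, rfl⟩
    rcases Nat.le_total i j with hij | hij
    · exact ⟨i, hi, j, ⟨hij, by omega⟩,
        by rw [List.getD_eq_getElem _ _ hi, List.getD_eq_getElem _ _ hj]⟩
    · exact ⟨j, hj, i, ⟨hij, by omega⟩,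
        by rw [List.getD_eq_getElem _ _ hj, List.getD_eq_getElem _ _ hi]; ring⟩

lemma pv_bitset_eq (limit : Int) :
    ((List.range (find_abundant limit).toArray.size).foldl (fun bs i =>
      (List.range' i ((find_abundant limit).toArray.size - i)).foldl (fun bs j =>
        let abundant_sum := (find_abundant limit).toArray.getD i 0 +
          (find_abundant limit).toArray.getD j 0
        if abundant_sum ≤ limit then bs.setIfInBounds abundant_sum.toNat true else bs) bs)
      (Array.replicate (limit + 1).toNat false)).toList = pvBitset limit := by
  rw [PySem.List.foldl_congr_mem _ _ (fun bs i =>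
      ((List.range' i ((find_abundant limit).toArray.size - i)).map
        (fun j => (find_abundant limit).toArray.getD i 0 +
          (find_abundant limit).toArray.getD j 0)).foldl
        (fun bs s => if s ≤ limit then bs.setIfInBounds s.toNat true else bs) bs) _
      (fun bs i _ => by beta_reduce; rw [List.foldl_map])]
  rw [pv_foldl_flatMap, pv_arr_mark_toList]
  unfold pvBitset pvSums
  congr 1
  simp only [pv_toArray_getD, List.size_toArray]

lemma pv_bitset_length (limit : Int) : (pvBitset limit).length = (limit + 1).toNat := by
  unfold pvBitset; rw [pv_mark_length]; simp

lemma pv_bit_iff (limit : Int) (k : Nat) (hk : k < (limit + 1).toNat) :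
    ((pvBitset limit).getD k false = true ↔
      ∃ a ∈ find_abundant limit, ∃ b ∈ find_abundant limit, (k : Int) = a + b) := by
  unfold pvBitset
  have hpos : ∀ s ∈ pvSums (find_abundant limit), 0 ≤ s := by
    intro s hs
    rcases (pv_sums_mem _ s).mp hs with ⟨a, ha, b, hb, rfl⟩
    have := (pv_fa_mem ha).1; have := (pv_fa_mem hb).1; omega
  rw [pv_mark_getD limit _ _ k (by simpa using hk) hpos]
  rw [show (List.replicate (limit + 1).toNat false).getD k false = false by
    simp [List.getD]]
  simp only [Bool.false_eq_true, false_or]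
  constructor
  · rintro ⟨s, hs, _, hsk⟩
    rcases (pv_sums_mem _ s).mp hs with ⟨a, ha, b, hb, h⟩
    exact ⟨a, ha, b, hb, by omega⟩
  · rintro ⟨a, ha, b, hb, h⟩
    exact ⟨a + b, (pv_sums_mem _ _).mpr ⟨a, ha, b, hb, rfl⟩, by omega, h.symm⟩

lemma pv_scan_iff (fl : Array Bool) (n : Int) (l : List Int)
    (hl : l.Pairwise (· < ·)) :
    scanLoop fl n l = true ↔ ∃ a ∈ l, a ≤ n ∧ fl.getD (n - a).toNat false = true := by
  induction l with
  | nil => simp [scanLoop]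
  | cons a rest ih =>
    rcases List.pairwise_cons.mp hl with ⟨hall, hrest⟩
    unfold scanLoop
    by_cases hgt : a > n
    · simp only [if_pos hgt, Bool.false_eq_true, false_iff]
      rintro ⟨b, hb, hbn, -⟩
      rcases List.mem_cons.mp hb with rfl | hb
      · omega
      · exact absurd hbn (by have := hall b hb; omega)
    · rw [if_neg hgt]
      by_cases hc : fl.getD (n - a).toNat false = true
      · simp only [if_pos hc, true_iff]
        exact ⟨a, by simp, by omega, hc⟩
      · rw [if_neg hc, ih hrest]
        constructor
        · rintro ⟨b, hb, h1, h2⟩; exact ⟨b, by simp [hb], h1, h2⟩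
        · rintro ⟨b, hb, h1, h2⟩
          rcases List.mem_cons.mp hb with rfl | hb
          · exact absurd h2 hc
          · exact ⟨b, hb, h1, h2⟩

lemma pv_enum_sum (bs : List Bool) :
    (PySem.List.enumerate bs 0).foldl (fun acc p => if !p.2 then acc + p.1 else acc) 0
      = ((PySem.List.pyRange 0 (bs.length : Int) 1).map
          (fun j => if !(PySem.List.pyGetD bs j false) then j else 0)).sum := by
  rw [PySem.List.foldl_congr_mem (PySem.List.enumerate bs) _
    (fun acc (p : Int × Bool) => acc + (if !p.2 then p.1 else 0)) 0
    (fun acc p _ => by by_cases hp : p.2 <;> simp [hp])]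
  rw [PySem.List.foldl_add]
  rw [PySem.List.enumerate_eq_map_pyRange bs false]
  simp [List.map_map, Function.comp_def]

lemma pv_A_eq (limit : Int) :
    sum_of_positive_integers limit =
      ((PySem.List.pyRange 0 (((limit + 1).toNat : Nat) : Int) 1).map
        (fun j => if !(PySem.List.pyGetD (pvBitset limit) j false) then j else 0)).sum := by
  unfold sum_of_positive_integers
  show (PySem.List.enumerate
      ((List.range (find_abundant limit).toArray.size).foldl (fun bs i =>
        (List.range' i ((find_abundant limit).toArray.size - i)).foldl (fun bs j =>
          let abundant_sum := (find_abundant limit).toArray.getD i 0 +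
            (find_abundant limit).toArray.getD j 0
          if abundant_sum ≤ limit then bs.setIfInBounds abundant_sum.toNat true else bs) bs)
        (Array.replicate (limit + 1).toNat false)).toList 0).foldl
      (fun acc p => if !p.2 then acc + p.1 else acc) 0 = _
  rw [pv_bitset_eq, pv_enum_sum, pv_bitset_length]

lemma pv_B_eq (limit : Int) :
    sum_of_positive_integers_alt limit =
      ((PySem.List.pyRange 0 (limit + 1) 1).map
        (fun n => if scanLoop (pvFlags limit) n (find_abundant limit)
          then 0 else n)).sum := by
  unfold sum_of_positive_integers_alt
  show (PySem.List.pyRange 0 (limit + 1) 1).foldl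
      (fun total n => if scanLoop (pvFlags limit) n (find_abundant limit)
        then total else total + n) 0 = _
  rw [PySem.List.foldl_congr_mem (PySem.List.pyRange 0 (limit + 1) 1) _
    (fun total n => total +
      (if scanLoop (pvFlags limit) n (find_abundant limit) then 0 else n)) 0
    (fun acc n _ => by
      by_cases h : scanLoop (pvFlags limit) n (find_abundant limit) <;> simp [h])]
  rw [PySem.List.foldl_add]
  simp

lemma pv_point (limit n : Int) (h0 : 0 ≤ n) (h1 : n < limit + 1) :
    ((pvBitset limit).getD n.toNat false = true ↔
      scanLoop (pvFlags limit) n (find_abundant limit) = true) := by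
  rw [pv_bit_iff limit n.toNat (by omega)]
  rw [pv_scan_iff _ _ _ (pv_fa_sorted limit)]
  constructor
  · rintro ⟨a, ha, b, hb, hab⟩
    have hb1 := (pv_fa_mem hb).1
    have hb2 := (pv_fa_mem hb).2
    refine ⟨a, ha, by omega, ?_⟩
    rw [pv_flag_iff limit _ (by omega)]
    rw [show (((n - a).toNat : Nat) : Int) = b by omega]
    exact hb
  · rintro ⟨a, ha, han, hflag⟩
    have ha1 := (pv_fa_mem ha).1
    have hmem : (((n - a).toNat : Nat) : Int) ∈ find_abundant limit := by
      rw [← pv_flag_iff limit _ (by omega)]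
      exact hflag
    exact ⟨a, ha, n - a, by rwa [show (n - a : Int) = (((n - a).toNat : Nat) : Int) by omega],
      by omega⟩

lemma pv_main (limit : Int) :
    sum_of_positive_integers limit = sum_of_positive_integers_alt limit := by
  rw [pv_A_eq, pv_B_eq]
  by_cases hneg : limit + 1 ≤ 0
  · rw [PySem.List.pyRange_one_eq_nil (by omega : (limit+1:Int) ≤ 0),
      PySem.List.pyRange_one_eq_nil (by omega : (((limit + 1).toNat : Nat) : Int) ≤ 0)]
    rfl
  · rw [show (((limit + 1).toNat : Nat) : Int) = limit + 1 by omega]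
    congr 1
    apply List.map_congr_left
    intro n hn
    rcases PySem.List.mem_pyRange_one.mp hn with ⟨hn0, hn1⟩
    have hlen : n < ((pvBitset limit).length : Int) := by
      rw [pv_bitset_length]; omega
    have hget : PySem.List.pyGetD (pvBitset limit) n false =
        (pvBitset limit).getD n.toNat false := by
      rw [PySem.List.pyGetD_eq_getElem (pvBitset limit) false hn0 (by simpa using hlen)]
      rw [List.getD_eq_getElem _ _ (by omega)]
    have hpt := pv_point limit n hn0 hn1
    rw [hget]
    rcases hb : (pvBitset limit).getD n.toNat false with _ | _ <;>
      rcases hsc : scanLoop (pvFlags limit) n (find_abundant limit) with _ | _ <;> simp_all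

-- ===== VERDICT (by name: the statement is the Claim_ definition above) =====
theorem sum_of_positive_integers_spec : Claim_equal_sum_of_positive_integers := by
  intro limit _
  simpa [Spec_sum_of_positive_integers] using pv_main limit
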